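-- pv_equiv track=rewrite | github.com/ITMO-NSS-team/TabDomain_Extractor | baseline/d4_baseline.py | compute_eqs
-- ===== SOURCE A (Python) =====
-- from collections import defaultdict
--
-- def compute_eqs(term_to_cols):
--     eq_dict = defaultdict(list)
--     for term, cols in term_to_cols.items():
--         key = tuple(sorted(cols))
--         eq_dict[key].append(term)
--     eqs = list(eq_dict.values())
--     term_to_eq = {term: i for i, eq in enumerate(eqs) for term in eq}
--     return eqs, term_to_eq
-- ===== SOURCE B (Python) =====
-- def compute_eqs(term_to_cols):
--     keyed = [(term, tuple(sorted(cols))) for term, cols in term_to_cols.items()]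
--     keys = []
--     for _, k in keyed:
--         if k not in keys:
--             keys.append(k)
--     eqs = [[t for t, k in keyed if k == key] for key in keys]
--     term_to_eq = {term: i for i, eq in enumerate(eqs) for term in eq}
--     return eqs, term_to_eq
-- ===== Notes on version B (the rewrite author's own statement) =====
-- stated objective: alternative
-- what changed: Replaces the defaultdict-of-lists accumulation with a dict-free scheme: precompute the canonical key per term, collect the distinct keys in first-appearance order, and build each group by filtering the keyed list.
import Mathlib
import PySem

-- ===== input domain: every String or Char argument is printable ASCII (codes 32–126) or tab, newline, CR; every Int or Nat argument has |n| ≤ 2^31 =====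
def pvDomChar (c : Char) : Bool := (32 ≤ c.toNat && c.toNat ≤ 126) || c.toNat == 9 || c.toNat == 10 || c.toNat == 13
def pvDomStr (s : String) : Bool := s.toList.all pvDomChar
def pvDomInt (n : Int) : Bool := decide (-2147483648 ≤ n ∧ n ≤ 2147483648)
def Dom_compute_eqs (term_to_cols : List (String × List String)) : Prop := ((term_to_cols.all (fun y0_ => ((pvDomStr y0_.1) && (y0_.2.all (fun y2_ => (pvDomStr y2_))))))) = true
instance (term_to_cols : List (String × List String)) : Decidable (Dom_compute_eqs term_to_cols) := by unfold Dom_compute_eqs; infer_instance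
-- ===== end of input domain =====

-- B drops the defaultdict: it precomputes each term's canonical key, dedups the keys in
-- first-appearance order, and builds every group by filtering; same result, no hash map.

-- ===== PORT A =====
def compute_eqs (term_to_cols : List (String × List String)) : List (List String) × (List (String × Int)) :=
  -- eq_dict = defaultdict(list); for term, cols: eq_dict[tuple(sorted(cols))].append(term)
  let eq_dict : PySem.Dict (List String) (List String) :=
    term_to_cols.foldl (fun d p =>
      let key := PySem.List.sorted p.2 (fun x => x) false
      d.modify key [] (fun v => v ++ [p.1])) PySem.Dict.empty
  let eqs := eq_dict.values
  -- term_to_eq = {term: i for i, eq in enumerate(eqs) for term in eq}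
  let term_to_eq : PySem.Dict String Int :=
    (PySem.List.enumerate eqs 0).foldl (fun d ie =>
      ie.2.foldl (fun d t => d.insert t ie.1) d) PySem.Dict.empty
  (eqs, term_to_eq.items)

-- ===== PORT B =====
def compute_eqs_alt (term_to_cols : List (String × List String)) : List (List String) × (List (String × Int)) :=
  let keyed := term_to_cols.map (fun p => (p.1, PySem.List.sorted p.2 (fun x => x) false))
  -- for _, k in keyed: if k not in keys: keys.append(k)
  let keys : List (List String) :=
    keyed.foldl (fun ks p => if p.2 ∈ ks then ks else ks ++ [p.2]) []
  -- eqs = [[t for t, k in keyed if k == key] for key in keys]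
  let eqs := keys.map (fun key => (keyed.filter (fun p => p.2 == key)).map (fun p => p.1))
  -- term_to_eq = {term: i for i, eq in enumerate(eqs) for term in eq}
  let term_to_eq : PySem.Dict String Int :=
    (PySem.List.enumerate eqs 0).foldl (fun d ie =>
      ie.2.foldl (fun d t => d.insert t ie.1) d) PySem.Dict.empty
  (eqs, term_to_eq.items)

-- ===== PRECONDITION & SPEC =====
def Spec_compute_eqs (term_to_cols : List (String × List String)) (out : List (List String) × (List (String × Int))) : Prop := out = compute_eqs_alt term_to_cols
instance (term_to_cols : List (String × List String)) (out : List (List String) × (List (String × Int))) : Decidable (Spec_compute_eqs term_to_cols out) := by unfold Spec_compute_eqs; infer_instance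

-- ===== CLAIM (what is proved, stated in full; the proofs are below) =====
def Claim_equal_compute_eqs : Prop := ∀ (term_to_cols : List (String × List String)), Dom_compute_eqs term_to_cols → Spec_compute_eqs term_to_cols (compute_eqs term_to_cols)

-- ===== LEMMAS AND PROOFS =====

-- B's explicit `if k not in keys` dedup loop is exactly Set.ofList-style accumulation.
theorem keys_foldl_eq_set_foldl (l : List (String × List String)) (acc : List (List String)) :
    l.foldl (fun ks p => if p.2 ∈ ks then ks else ks ++ [p.2]) acc
      = (l.map (fun p => p.2)).foldl PySem.Set.add acc := by
  induction l generalizing acc with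
  | nil => rfl
  | cons h t ih =>
    simp only [List.foldl_cons, List.map_cons]
    rw [ih]
    congr 1
    simp [PySem.Set.add, PySem.Set.contains]

-- the two ports compute the same groups list
theorem eqs_eq (tcl : List (String × List String)) :
    (tcl.foldl (fun d p =>
        let key := PySem.List.sorted p.2 (fun x => x) false
        d.modify key [] (fun v => v ++ [p.1])) (PySem.Dict.empty : PySem.Dict (List String) (List String))).values
      = ((tcl.map (fun p => (p.1, PySem.List.sorted p.2 (fun x => x) false))).foldl
            (fun ks p => if p.2 ∈ ks then ks else ks ++ [p.2]) []).map
          (fun key => (((tcl.map (fun p => (p.1, PySem.List.sorted p.2 (fun x => x) false))).filter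
              (fun p => p.2 == key)).map (fun p => p.1))) := by
  set key : (String × List String) → List String :=
    fun p => PySem.List.sorted p.2 (fun x => x) false with hkey
  set d := tcl.foldl (fun d p =>
      d.modify (key p) [] (fun v => v ++ [p.1]))
      (PySem.Dict.empty : PySem.Dict (List String) (List String)) with hd
  have hnd : d.keys.Nodup := by
    rw [hd]
    exact PySem.Dict.nodup_keys_foldl_modify_key tcl key [] (fun _ p => (fun v => v ++ [p.1])) _
      (by simp [PySem.Dict.keys_empty])
  have hkeys : d.keys = PySem.Set.ofList (tcl.map key) := by
    rw [hd, PySem.Dict.keys_foldl_modify_key]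
    rfl
  have hval : d.values = d.keys.map (fun k => d.getD k []) :=
    PySem.Dict.values_eq_map_keys d hnd []
  have hgetD : ∀ k, d.getD k [] = ((tcl.map (fun p => (key p, p.1))).filter
      (fun q => q.1 == k)).map (fun q => q.2) := by
    intro k
    have := PySem.Dict.getD_foldl_modify_append
      (l := tcl.map (fun p => (key p, p.1)))
      (d := (PySem.Dict.empty : PySem.Dict (List String) (List String))) (c := k)
    rw [List.foldl_map] at this
    rw [hd]
    simpa [PySem.Dict.getD_empty] using this
  rw [keys_foldl_eq_set_foldl]
  have hmk : (tcl.map (fun p => (p.1, key p))).map (fun p => p.2) = tcl.map key := by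
    simp [List.map_map, Function.comp_def]
  rw [hmk, hval, hkeys]
  simp only [PySem.Set.ofList_eq_foldl]
  apply List.map_congr_left
  intro k _
  rw [hgetD k]
  simp [List.filter_map, List.map_map, Function.comp_def, hkey]

-- ===== VERDICT (by name: the statement is the Claim_ definition above) =====
theorem compute_eqs_spec : Claim_equal_compute_eqs := by
  intro tcl _
  show compute_eqs tcl = compute_eqs_alt tcl
  unfold compute_eqs compute_eqs_alt
  simp only [eqs_eq tcl]
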